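-- pv_equiv track=rewrite | github.com/mjstapp/frr | tests/topotests/bgp_link_state_bgp_fabric/test_bgp_link_state_bgp_fabric.py | count_all_nlris_by_type
-- ===== SOURCE A (Python) =====
-- def count_all_nlris_by_type(data):
--     """
--     Count all NLRIs by type across all routers
--
--     Args:
--         data: BGP-LS JSON data (dict with 'routes' key)
--
--     Returns:
--         Dictionary with counts: {
--             'nodes': int,
--             'links': int,
--             'prefixes': int,
--             'total': int
--         }
--     """
--     # Extract all route objects from the routes dictionary
--     all_routes = []
--     if "routes" in data:
--         for nlri_key, route_list in data["routes"].items():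
--             all_routes.extend(route_list)
--
--     nodes = [r for r in all_routes if r.get("nlri", {}).get("nlriType") == "node"]
--     links = [r for r in all_routes if r.get("nlri", {}).get("nlriType") == "link"]
--     prefixes = [r for r in all_routes if r.get("nlri", {}).get("nlriType") in ["ipv4Prefix", "ipv6Prefix"]]
--
--     return {
--         'nodes': len(nodes),
--         'links': len(links),
--         'prefixes': len(prefixes),
--         'total': len(nodes) + len(links) + len(prefixes)
--     }
-- ===== SOURCE B (Python) =====
-- def count_all_nlris_by_type(data):
--     nodes = links = prefixes = 0
--     if "routes" in data:
--         for route_list in data["routes"].values():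
--             for r in route_list:
--                 t = r.get("nlri", {}).get("nlriType")
--                 if t == "node":
--                     nodes += 1
--                 elif t == "link":
--                     links += 1
--                 elif t in ("ipv4Prefix", "ipv6Prefix"):
--                     prefixes += 1
--     return {
--         'nodes': nodes,
--         'links': links,
--         'prefixes': prefixes,
--         'total': nodes + links + prefixes,
--     }
-- ===== Notes on version B (the rewrite author's own statement) =====
-- stated objective: simpler
-- what changed: Replaces the build-all-routes-list-then-three-filter-scans shape with a single accumulating pass that classifies each route once into three counters.
import Mathlib
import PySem

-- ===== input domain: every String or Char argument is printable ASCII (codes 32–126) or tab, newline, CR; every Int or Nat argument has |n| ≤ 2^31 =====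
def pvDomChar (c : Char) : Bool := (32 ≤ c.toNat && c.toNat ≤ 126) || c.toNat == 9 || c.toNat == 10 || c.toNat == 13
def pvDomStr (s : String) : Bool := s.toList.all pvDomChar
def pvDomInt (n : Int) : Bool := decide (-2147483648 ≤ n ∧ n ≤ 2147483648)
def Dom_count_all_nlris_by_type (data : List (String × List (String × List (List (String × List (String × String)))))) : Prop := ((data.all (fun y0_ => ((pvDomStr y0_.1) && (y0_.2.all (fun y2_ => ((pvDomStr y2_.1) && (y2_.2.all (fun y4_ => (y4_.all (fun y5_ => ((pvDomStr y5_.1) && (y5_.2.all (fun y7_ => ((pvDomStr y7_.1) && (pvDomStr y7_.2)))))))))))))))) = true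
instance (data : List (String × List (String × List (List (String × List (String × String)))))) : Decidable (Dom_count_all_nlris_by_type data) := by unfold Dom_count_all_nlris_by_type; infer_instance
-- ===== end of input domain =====

-- B replaces A's build-all-routes-list-plus-three-filter-scans with one accumulating pass over the routes (three counters); same return value.
-- ===== PORT A =====
-- r.get("nlri", {}).get("nlriType") : first-match lookup, the dict convention for assoc lists
def pvNlriType (r : List (String × List (String × String))) : Option String :=
  List.lookup "nlriType" ((List.lookup "nlri" r).getD [])

def count_all_nlris_by_type (data : List (String × List (String × List (List (String × List (String × String)))))) : List (String × Int) :=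
  let all_routes :=
    match List.lookup "routes" data with
    | some routes =>
        routes.foldl
          (fun (acc : List (List (String × List (String × String))))
               (kv : String × List (List (String × List (String × String)))) => acc ++ kv.2) []
    | none => []
  let nodes := all_routes.filter (fun r => pvNlriType r == some "node")
  let links := all_routes.filter (fun r => pvNlriType r == some "link")
  let prefixes := all_routes.filter (fun r => pvNlriType r == some "ipv4Prefix" || pvNlriType r == some "ipv6Prefix")
  [("nodes", (nodes.length : Int)), ("links", (links.length : Int)),
   ("prefixes", (prefixes.length : Int)),
   ("total", (nodes.length : Int) + (links.length : Int) + (prefixes.length : Int))]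

-- ===== PORT B =====
-- classify one route into the (nodes, links, prefixes) counter triple
def pvBump (acc : Int × Int × Int) (r : List (String × List (String × String))) : Int × Int × Int :=
  match List.lookup "nlriType" ((List.lookup "nlri" r).getD []) with
  | some "node" => (acc.1 + 1, acc.2.1, acc.2.2)
  | some "link" => (acc.1, acc.2.1 + 1, acc.2.2)
  | some "ipv4Prefix" => (acc.1, acc.2.1, acc.2.2 + 1)
  | some "ipv6Prefix" => (acc.1, acc.2.1, acc.2.2 + 1)
  | _ => acc

def count_all_nlris_by_type_alt (data : List (String × List (String × List (List (String × List (String × String)))))) : List (String × Int) :=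
  let c :=
    match List.lookup "routes" data with
    | some routes => routes.foldl
          (fun (acc : Int × Int × Int)
               (kv : String × List (List (String × List (String × String)))) => kv.2.foldl pvBump acc) (0, 0, 0)
    | none => ((0 : Int), (0 : Int), (0 : Int))
  [("nodes", c.1), ("links", c.2.1), ("prefixes", c.2.2), ("total", c.1 + c.2.1 + c.2.2)]

-- ===== PRECONDITION & SPEC =====
def Spec_count_all_nlris_by_type (data : List (String × List (String × List (List (String × List (String × String)))))) (out : List (String × Int)) : Prop := out = count_all_nlris_by_type_alt data
instance (data : List (String × List (String × List (List (String × List (String × String)))))) (out : List (String × Int)) : Decidable (Spec_count_all_nlris_by_type data out) := by unfold Spec_count_all_nlris_by_type; infer_instance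

-- ===== CLAIM (what is proved, stated in full; the proofs are below) =====
def Claim_equal_count_all_nlris_by_type : Prop := ∀ (data : List (String × List (String × List (List (String × List (String × String)))))), Dom_count_all_nlris_by_type data → Spec_count_all_nlris_by_type data (count_all_nlris_by_type data)

-- ===== LEMMAS AND PROOFS =====
-- count of one category in a route list (Int-valued filter length)
def pvCnt (p : List (String × List (String × String)) → Bool)
    (rs : List (List (String × List (String × String)))) : Int :=
  ((rs.filter p).length : Int)

lemma pvBump_eq (acc : Int × Int × Int) (r : List (String × List (String × String))) :
    pvBump acc r =
      (acc.1 + (if pvNlriType r == some "node" then 1 else 0),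
       acc.2.1 + (if pvNlriType r == some "link" then 1 else 0),
       acc.2.2 + (if pvNlriType r == some "ipv4Prefix" || pvNlriType r == some "ipv6Prefix" then 1 else 0)) := by
  unfold pvBump pvNlriType
  rcases h : List.lookup "nlriType" ((List.lookup "nlri" r).getD []) with _ | t
  · simp
  · by_cases h1 : t = "node"
    · subst h1; simp
    · by_cases h2 : t = "link"
      · subst h2; simp
      · by_cases h3 : t = "ipv4Prefix"
        · subst h3; simp
        · by_cases h4 : t = "ipv6Prefix"
          · subst h4; simp
          · split <;> simp_all

lemma pvBump_foldl (rs : List (List (String × List (String × String)))) (acc : Int × Int × Int) :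
    rs.foldl pvBump acc =
      (acc.1 + pvCnt (fun r => pvNlriType r == some "node") rs,
       acc.2.1 + pvCnt (fun r => pvNlriType r == some "link") rs,
       acc.2.2 + pvCnt (fun r => pvNlriType r == some "ipv4Prefix" || pvNlriType r == some "ipv6Prefix") rs) := by
  induction rs generalizing acc with
  | nil => simp [pvCnt]
  | cons r rs ih =>
    rw [List.foldl_cons, ih, pvBump_eq]
    simp only [pvCnt, List.filter_cons]
    split_ifs <;> simp [Prod.ext_iff] <;> omega

lemma pvOuter_foldl (routes : List (String × List (List (String × List (String × String))))) :
    routes.foldl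
          (fun (acc : Int × Int × Int)
               (kv : String × List (List (String × List (String × String)))) => kv.2.foldl pvBump acc) (0, 0, 0) =
      (pvCnt (fun r => pvNlriType r == some "node") (routes.flatMap (·.2)),
       pvCnt (fun r => pvNlriType r == some "link") (routes.flatMap (·.2)),
       pvCnt (fun r => pvNlriType r == some "ipv4Prefix" || pvNlriType r == some "ipv6Prefix") (routes.flatMap (·.2))) := by
  suffices h : ∀ acc : Int × Int × Int, routes.foldl (fun acc kv => kv.2.foldl pvBump acc) acc =
      (acc.1 + pvCnt (fun r => pvNlriType r == some "node") (routes.flatMap (·.2)),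
       acc.2.1 + pvCnt (fun r => pvNlriType r == some "link") (routes.flatMap (·.2)),
       acc.2.2 + pvCnt (fun r => pvNlriType r == some "ipv4Prefix" || pvNlriType r == some "ipv6Prefix") (routes.flatMap (·.2))) by
    rw [h]; simp
  induction routes with
  | nil => simp [pvCnt]
  | cons kv rest ih =>
    intro acc
    rw [List.foldl_cons, pvBump_foldl, ih]
    simp [pvCnt, List.filter_append, Prod.ext_iff]
    omega

-- ===== VERDICT (by name: the statement is the Claim_ definition above) =====
theorem count_all_nlris_by_type_spec : Claim_equal_count_all_nlris_by_type := by
  intro data _hdom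
  unfold Spec_count_all_nlris_by_type count_all_nlris_by_type count_all_nlris_by_type_alt
  rcases h : List.lookup "routes" data with _ | routes
  · simp
  · simp only [pvOuter_foldl, PySem.List.foldl_append_eq_flatMap, List.nil_append, pvCnt]
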